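-- pv_equiv track=rewrite | github.com/Saurabh262004/pg-extended | src/pg_extended/UI/Elements/TextInput_t.py | getSplitText
-- ===== SOURCE A (Python) =====
-- LINE_SPLIT_UNICODES = ' \t\u00A0\u2000\u200A\u3000'+',.;:!?\'\"(){}[]/\\|-_\r\f\v'
--
-- def getSplitText(text: str):
-- 	splitArr = ['']
--
-- 	for char in text:
-- 		if char.isspace():
-- 			if splitArr[-1].isspace():
-- 				splitArr[-1] += char
-- 			else:
-- 				splitArr.append(char)
--
-- 		elif char in LINE_SPLIT_UNICODES:
-- 			splitArr.append(char)
--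
-- 		else:
-- 			if splitArr[-1] and not splitArr[-1].isspace() and splitArr[-1] not in LINE_SPLIT_UNICODES:
-- 				splitArr[-1] += char
-- 			else:
-- 				splitArr.append(char)
--
-- 	if splitArr[0] == '':
-- 		splitArr = splitArr[1:]
--
-- 	return splitArr
-- ===== SOURCE B (Python) =====
-- LINE_SPLIT_UNICODES = ' \t\u00A0\u2000\u200A\u3000'+',.;:!?\'\"(){}[]/\\|-_\r\f\v'
-- _DELIMS = frozenset(LINE_SPLIT_UNICODES)
--
-- def _cat(ch):
--     # 0 = whitespace, 1 = delimiter, 2 = word character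
--     return 0 if ch.isspace() else 1 if ch in _DELIMS else 2
--
-- def getSplitText(text: str):
--     # staged passes: classify every character once, compute all cut positions,
--     # then slice the text at the cuts in one comprehension
--     if not text:
--         return []
--     cls = [_cat(ch) for ch in text]
--     n = len(text)
--     cuts = [0] + [i for i in range(1, n) if cls[i] != cls[i - 1] or cls[i] == 1] + [n]
--     return [text[a:b] for a, b in zip(cuts, cuts[1:])]
-- ===== Notes on version B (the rewrite author's own statement) =====
-- stated objective: faster
-- what changed: B replaces A's single pass that mutates the last token (re-running isspace and a substring test on the growing token at every character) by staged passes: classify every character once, compute the list of cut positions between runs, then slice the text at those cuts.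
import Mathlib
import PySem

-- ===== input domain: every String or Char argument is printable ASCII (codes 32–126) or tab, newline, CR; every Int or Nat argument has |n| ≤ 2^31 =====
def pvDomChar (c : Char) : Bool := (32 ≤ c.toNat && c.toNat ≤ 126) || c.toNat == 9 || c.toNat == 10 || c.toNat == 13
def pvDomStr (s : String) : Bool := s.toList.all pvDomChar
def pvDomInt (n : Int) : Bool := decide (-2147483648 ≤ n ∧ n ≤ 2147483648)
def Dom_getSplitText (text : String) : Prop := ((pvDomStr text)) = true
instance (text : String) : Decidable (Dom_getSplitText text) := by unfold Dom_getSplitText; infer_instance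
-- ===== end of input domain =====

-- B replaces A's single pass mutating the last token by staged passes: classify each
-- character once, compute all cut positions between runs, then slice at the cuts (faster).

-- ===== PORT A =====
-- LINE_SPLIT_UNICODES (\f = \x0C, \v = \x0B)
def pvLS : List Char := (" \t\u00A0\u2000\u200A\u3000" ++ ",.;:!?'\"(){}[]/\\|-_\r\x0C\x0B").toList

-- splitArr is kept reversed (head = splitArr[-1]); the [] case is unreachable (splitArr starts nonempty)
def getSplitTextStep (splitArr : List (List Char)) (char : Char) : List (List Char) :=
  match splitArr with
  | [] => []
  | last :: rest =>
    if PySem.Chars.isspace char then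
      if PySem.Chars.strIsspace last then (last ++ [char]) :: rest
      else [char] :: last :: rest
    else if PySem.Chars.isIn [char] pvLS then
      [char] :: last :: rest
    else
      if last ≠ [] ∧ PySem.Chars.strIsspace last = false ∧ PySem.Chars.isIn last pvLS = false
      then (last ++ [char]) :: rest
      else [char] :: last :: rest

def getSplitText (text : String) : List String :=
  let splitArr := (text.toList.foldl getSplitTextStep [[]]).reverse
  let splitArr := if splitArr.head? = some [] then splitArr.drop 1 else splitArr
  splitArr.map (fun cs => String.ofList cs)

-- ===== PORT B =====
def pvDelims : PySem.Set Char := PySem.Set.ofList pvLS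

-- _cat: 0 = whitespace, 1 = delimiter, 2 = word character
def pvCatB (ch : Char) : Int :=
  if PySem.Chars.isspace ch then 0 else if pvDelims.contains ch then 1 else 2

def getSplitText_alt (text : String) : List String :=
  let cs := text.toList
  if cs.isEmpty then []
  else
    let cls := cs.map pvCatB
    let n : Int := cs.length
    let cuts : List Int := 0 :: (PySem.List.pyRange 1 n 1).filter
        (fun i => (PySem.List.pyGetD cls i 0 != PySem.List.pyGetD cls (i - 1) 0) ||
                  (PySem.List.pyGetD cls i 0 == 1)) ++ [n]
    (cuts.zip cuts.tail).map (fun ab => String.ofList (PySem.List.slice cs (some ab.1) (some ab.2)))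

-- ===== PRECONDITION & SPEC =====
def Spec_getSplitText (text : String) (out : List String) : Prop := out = getSplitText_alt text
instance (text : String) (out : List String) : Decidable (Spec_getSplitText text out) := by unfold Spec_getSplitText; infer_instance

-- ===== CLAIM (what is proved, stated in full; the proofs are below) =====
def Claim_equal_getSplitText : Prop := ∀ (text : String), Dom_getSplitText text → Spec_getSplitText text (getSplitText text)

-- ===== LEMMAS AND PROOFS =====

-- character categories
inductive PvCat : Type
  | w | d | t
deriving DecidableEq, Repr

def pvCatOf (ch : Char) : PvCat :=
  if PySem.Chars.isspace ch then .w
  else if pvDelims.contains ch then .d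
  else .t

def pvCatIdx : PvCat → Int
  | .w => 0
  | .d => 1
  | .t => 2

-- the canonical tokenization: chunk cs into maximal runs of equal category, delimiters singleton
def pvChunksC : List Char → PvCat → List Char → List (List Char)
  | cur, _, [] => [cur]
  | cur, k, c :: rest =>
    if pvCatOf c = k ∧ k ≠ .d then pvChunksC (cur ++ [c]) k rest
    else cur :: pvChunksC [c] (pvCatOf c) rest

def pvChunks : List Char → List (List Char)
  | [] => []
  | c :: rest => pvChunksC [c] (pvCatOf c) rest

-- ---------- A-side: A's fold equals an old-style single-pass fold (pvStepOld), then pvChunks ----------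

-- reference single-pass step: state (out reversed, cur, cat)
def pvStepOld (st : List (List Char) × List Char × Option PvCat) (ch : Char) :
    List (List Char) × List Char × Option PvCat :=
  let (out, cur, cat) := st
  let c : PvCat := pvCatOf ch
  if cur ≠ [] ∧ some c = cat ∧ c ≠ .d then (out, cur ++ [ch], cat)
  else ((if cur ≠ [] then cur :: out else out), [ch], some c)

def pvOldAlt (text : String) : List String :=
  let (out, cur, _) := text.toList.foldl pvStepOld ([], [], none)
  let out := if cur ≠ [] then cur :: out else out
  out.reverse.map (fun cs => String.ofList cs)

theorem singleton_infix_iff_mem (c : Char) (s : List Char) : ([c] <:+: s) ↔ c ∈ s := by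
  constructor
  · intro h
    exact List.singleton_sublist.mp h.sublist
  · intro h
    obtain ⟨l1, l2, rfl⟩ := List.append_of_mem h
    exact ⟨l1, l2, by simp⟩

theorem isIn_singleton (c : Char) (s : List Char) :
    PySem.Chars.isIn [c] s = (decide (c ∈ s)) := by
  rw [Bool.eq_iff_iff, PySem.Chars.isIn_iff_infix, singleton_infix_iff_mem, decide_eq_true_eq]

theorem delims_contains (c : Char) : pvDelims.contains c = (decide (c ∈ pvLS)) := by
  by_cases h : c ∈ pvLS <;>
    simp [pvDelims, PySem.Set.mem_ofList, h]

-- the coupling invariant between A's splitArr (reversed) and pvStepOld's (out, cur, cat)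
def pvInv (a : List (List Char)) (st : List (List Char) × List Char × Option PvCat) : Prop :=
  (st.2.1 = [] → st.1 = [] ∧ a = [[]]) ∧
  (st.2.1 ≠ [] → a = st.2.1 :: st.1 ++ [[]] ∧
    ∃ k, st.2.2 = some k ∧ (∀ x ∈ st.2.1, pvCatOf x = k) ∧ (k = PvCat.d → ∃ c, st.2.1 = [c]))

theorem strIsspace_of_cat_w (cur : List Char) (hne : cur ≠ [])
    (h : ∀ x ∈ cur, pvCatOf x = PvCat.w) : PySem.Chars.strIsspace cur = true := by
  simp only [PySem.Chars.strIsspace, Bool.and_eq_true, Bool.not_eq_true', List.isEmpty_eq_false_iff,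
    List.all_eq_true]
  refine ⟨hne, fun x hx => ?_⟩
  have := h x hx
  unfold pvCatOf at this
  by_cases hs : PySem.Chars.isspace x = true
  · exact hs
  · simp [hs] at this
    split at this <;> simp at this

theorem cat_w_of_isspace (ch : Char) (h : PySem.Chars.isspace ch = true) : pvCatOf ch = PvCat.w := by
  simp [pvCatOf, h]

theorem not_strIsspace_of_cat (cur : List Char) (k : PvCat) (hk : k ≠ PvCat.w)
    (h : ∀ x ∈ cur, pvCatOf x = k) : PySem.Chars.strIsspace cur = false := by
  cases cur with
  | nil => rfl
  | cons c cs =>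
    have hc := h c (by simp)
    have hs : PySem.Chars.isspace c = false := by
      by_contra hh
      rw [Bool.not_eq_false] at hh
      exact hk (((cat_w_of_isspace c hh).symm.trans hc).symm)
    simp [PySem.Chars.strIsspace, hs]

theorem pvInv_mk (a : List (List Char)) (out : List (List Char)) (tok : List Char) (k : PvCat)
    (ha : a = tok :: out ++ [[]]) (htok : tok ≠ [])
    (hall : ∀ x ∈ tok, pvCatOf x = k) (hd : k = PvCat.d → ∃ c, tok = [c]) :
    pvInv a (out, tok, some k) :=
  ⟨fun hc => absurd hc htok, fun _ => ⟨ha, k, rfl, hall, hd⟩⟩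

theorem pvInv_init (ch : Char) (k : PvCat) (hk : pvCatOf ch = k) :
    pvInv [[ch], []] ([], [ch], some k) :=
  pvInv_mk _ _ _ _ (by simp) (by simp)
    (fun x hx => by simp at hx; subst hx; exact hk) (fun _ => ⟨ch, rfl⟩)

theorem step_preserves (a : List (List Char)) (st : List (List Char) × List Char × Option PvCat)
    (ch : Char) (hinv : pvInv a st) :
    pvInv (getSplitTextStep a ch) (pvStepOld st ch) := by
  obtain ⟨out, cur, cat⟩ := st
  obtain ⟨h0, h1⟩ := hinv
  dsimp only at h0 h1
  by_cases hne : cur = []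
  · obtain ⟨hout, ha⟩ := h0 hne
    subst hne hout ha
    simp only [getSplitTextStep, pvStepOld]
    by_cases hs : PySem.Chars.isspace ch = true
    · rw [if_pos hs, if_neg (by simp [PySem.Chars.strIsspace])]
      rw [if_neg (by simp)]
      exact pvInv_init ch _ rfl
    · rw [if_neg hs]
      by_cases hmem : ch ∈ pvLS
      · have hin : PySem.Chars.isIn [ch] pvLS = true := by
          rw [isIn_singleton]; simpa using hmem
        rw [if_pos hin, if_neg (by simp)]
        exact pvInv_init ch _ rfl
      · have hin : PySem.Chars.isIn [ch] pvLS = false := by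
          rw [isIn_singleton]; simpa using hmem
        rw [hin]
        simp only [Bool.false_eq_true, if_false]
        rw [if_neg (by simp), if_neg (by simp)]
        exact pvInv_init ch _ rfl
  · obtain ⟨ha, k, hcat, hall, hd1⟩ := h1 hne
    subst ha
    subst hcat
    simp only [getSplitTextStep, pvStepOld, List.cons_append]
    by_cases hs : PySem.Chars.isspace ch = true
    · -- whitespace character: merge iff the current token is whitespace iff k = w
      rw [if_pos hs]
      have hcw : pvCatOf ch = PvCat.w := cat_w_of_isspace ch hs
      by_cases hkw : k = PvCat.w
      · subst hkw
        have hss := strIsspace_of_cat_w cur hne hall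
        rw [if_pos hss, if_pos ⟨hne, by rw [hcw], by rw [hcw]; decide⟩]
        refine pvInv_mk _ _ _ _ rfl (by simp [hne]) ?_ (fun h => absurd h (by decide))
        intro x hx
        rcases List.mem_append.mp hx with h | h
        · exact hall x h
        · simp at h; subst h; exact hcw
      · have hss := not_strIsspace_of_cat cur k hkw hall
        rw [hss]
        simp only [Bool.false_eq_true, if_false]
        rw [if_neg (fun h => hkw (by rw [hcw] at h; exact (Option.some.inj h.2.1).symm))]
        rw [if_pos hne]
        refine pvInv_mk _ _ _ _ (by simp) (by simp) ?_ (fun h => by rw [hcw] at h; exact absurd h (by decide))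
        intro x hx; simp at hx; subst hx; rfl
    · rw [if_neg hs]
      by_cases hd : pvDelims.contains ch = true
      · -- delimiter character: both append a fresh single-char token
        have hin : PySem.Chars.isIn [ch] pvLS = true := by
          rw [isIn_singleton]; rw [delims_contains] at hd; exact hd
        have hcd : pvCatOf ch = PvCat.d := by unfold pvCatOf; rw [if_neg hs, if_pos hd]
        rw [if_pos hin]
        rw [if_neg (fun h => by rw [hcd] at h; exact h.2.2 rfl), if_pos hne]
        refine pvInv_mk _ _ _ _ (by simp) (by simp) ?_ (fun _ => ⟨ch, rfl⟩)
        intro x hx; simp at hx; subst hx; rfl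
      · -- word character: merge iff k = t
        have hin : PySem.Chars.isIn [ch] pvLS = false := by
          rw [isIn_singleton]; rw [delims_contains] at hd; simpa using hd
        rw [hin]
        simp only [Bool.false_eq_true, if_false]
        have hct : pvCatOf ch = PvCat.t := by
          unfold pvCatOf; rw [if_neg hs, if_neg (by simpa using hd)]
        by_cases hkt : k = PvCat.t
        · subst hkt
          have hss := not_strIsspace_of_cat cur PvCat.t (by decide) hall
          have hnotin : PySem.Chars.isIn cur pvLS = false := by
            rw [← Bool.not_eq_true, PySem.Chars.isIn_iff_infix]
            intro hinf
            obtain ⟨c0, cs, rfl⟩ := List.exists_cons_of_ne_nil hne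
            have hc0 : c0 ∈ pvLS := hinf.subset (by simp)
            have hcat0 := hall c0 (by simp)
            simp only [pvCatOf] at hcat0
            rw [delims_contains] at hcat0
            by_cases hsp : PySem.Chars.isspace c0 = true
            · simp [hsp] at hcat0
            · simp [hsp, hc0] at hcat0
          rw [if_pos ⟨hne, hss, hnotin⟩, if_pos ⟨hne, by rw [hct], by rw [hct]; decide⟩]
          refine pvInv_mk _ _ _ _ rfl (by simp [hne]) ?_ (fun h => absurd h (by decide))
          intro x hx
          rcases List.mem_append.mp hx with h | h
          · exact hall x h
          · simp at h; subst h; exact hct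
        · have hacond : ¬ (cur ≠ [] ∧ PySem.Chars.strIsspace cur = false ∧ PySem.Chars.isIn cur pvLS = false) := by
            rintro ⟨-, hssf, hnotin⟩
            rcases k with _ | _ | _
            · rw [strIsspace_of_cat_w cur hne hall] at hssf; simp at hssf
            · obtain ⟨c0, rfl⟩ := hd1 rfl
              have hcat0 := hall c0 (by simp)
              simp only [pvCatOf] at hcat0
              rw [delims_contains] at hcat0
              by_cases hsp : PySem.Chars.isspace c0 = true
              · simp [hsp] at hcat0
              · by_cases hm : c0 ∈ pvLS
                · rw [isIn_singleton] at hnotin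
                  simp [hm] at hnotin
                · simp [hsp, hm] at hcat0
            · exact hkt rfl
          rw [if_neg hacond]
          rw [if_neg (fun h => hkt (by rw [hct] at h; exact (Option.some.inj h.2.1).symm))]
          rw [if_pos hne]
          refine pvInv_mk _ _ _ _ (by simp) (by simp) ?_ (fun h => by rw [hct] at h; exact absurd h (by decide))
          intro x hx; simp at hx; subst hx; rfl

theorem foldl_preserves (l : List Char) (a : List (List Char))
    (st : List (List Char) × List Char × Option PvCat) (hinv : pvInv a st) :
    pvInv (l.foldl getSplitTextStep a) (l.foldl pvStepOld st) := by
  induction l generalizing a st with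
  | nil => exact hinv
  | cons c cs ih => exact ih _ _ (step_preserves a st c hinv)

theorem A_eq_old (text : String) : getSplitText text = pvOldAlt text := by
  unfold getSplitText pvOldAlt
  have hinv := foldl_preserves text.toList [[]] ([], [], none)
    ⟨fun _ => ⟨rfl, rfl⟩, fun h => absurd rfl h⟩
  revert hinv
  generalize List.foldl getSplitTextStep [[]] text.toList = a
  generalize List.foldl pvStepOld ([], [], none) text.toList = st
  intro hinv
  obtain ⟨out, cur, cat⟩ := st
  obtain ⟨h0, h1⟩ := hinv
  dsimp only at h0 h1 ⊢
  by_cases hne : cur = []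
  · obtain ⟨hout, ha⟩ := h0 hne
    simp [hne, hout, ha]
  · obtain ⟨ha, _⟩ := h1 hne
    simp [hne, ha, List.reverse_append]

-- the old-style fold computes pvChunksC
def pvFinish (st : List (List Char) × List Char × Option PvCat) : List (List Char) :=
  (if st.2.1 ≠ [] then st.2.1 :: st.1 else st.1).reverse

theorem foldl_old_chunks (cs : List Char) (out : List (List Char)) (cur : List Char) (k : PvCat)
    (hne : cur ≠ []) :
    pvFinish (cs.foldl pvStepOld (out, cur, some k)) = out.reverse ++ pvChunksC cur k cs := by
  induction cs generalizing out cur k with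
  | nil => simp [pvFinish, pvChunksC, hne]
  | cons c rest ih =>
    rw [List.foldl_cons]
    by_cases hm : pvCatOf c = k ∧ k ≠ PvCat.d
    · have hstep : pvStepOld (out, cur, some k) c = (out, cur ++ [c], some k) := by
        simp only [pvStepOld]
        rw [if_pos ⟨hne, by rw [hm.1], by rw [hm.1]; exact hm.2⟩]
      rw [hstep, ih out (cur ++ [c]) k (by simp), pvChunksC, if_pos hm]
    · have hstep : pvStepOld (out, cur, some k) c = (cur :: out, [c], some (pvCatOf c)) := by
        simp only [pvStepOld]
        rw [if_neg (fun h => hm ⟨Option.some.inj h.2.1, fun hk => h.2.2 (by rw [Option.some.inj h.2.1]; exact hk)⟩)]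
        rw [if_pos hne]
      rw [hstep, ih (cur :: out) [c] (pvCatOf c) (by simp), pvChunksC, if_neg hm]
      simp

theorem old_eq_chunks (text : String) :
    pvOldAlt text = (pvChunks text.toList).map (fun cs => String.ofList cs) := by
  unfold pvOldAlt
  cases hcs : text.toList with
  | nil => simp [pvChunks]
  | cons c rest =>
    have h0 : pvStepOld ([], [], none) c = ([], [c], some (pvCatOf c)) := by
      simp [pvStepOld]
    rw [List.foldl_cons, h0]
    have hmain := foldl_old_chunks rest [] [c] (pvCatOf c) (by simp)
    generalize hst : List.foldl pvStepOld ([], [c], some (pvCatOf c)) rest = st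
    rw [hst] at hmain
    obtain ⟨out', cur', cat'⟩ := st
    simp only [pvFinish, List.reverse_nil, List.nil_append] at hmain
    simp only [pvChunks]
    rw [← hmain]

-- ---------- B-side: the port computes cut positions, reduced to Nat form ----------

def pvCK (cs : List Char) (k : Nat) : PvCat := pvCatOf (cs.getD k ' ')

def pvBdry (cs : List Char) (k : Nat) : Bool :=
  decide (pvCK cs (k + 1) ≠ pvCK cs k) || decide (pvCK cs (k + 1) = PvCat.d)

def pvCutsK (cs : List Char) : List Nat := (List.range (cs.length - 1)).filter (pvBdry cs)

def pvCutlist (cs : List Char) : List Nat := 0 :: (pvCutsK cs).map (· + 1) ++ [cs.length]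

def pvPairsTok (cs : List Char) (L : List Nat) : List (List Char) :=
  (L.zip L.tail).map (fun ab => (cs.drop ab.1).take (ab.2 - ab.1))

theorem catB_eq (ch : Char) : pvCatB ch = pvCatIdx (pvCatOf ch) := by
  unfold pvCatB pvCatOf
  split_ifs <;> rfl

theorem catIdx_inj (a b : PvCat) : pvCatIdx a = pvCatIdx b ↔ a = b := by
  cases a <;> cases b <;> simp [pvCatIdx]

theorem getD_map_catB (cs : List Char) (i : Nat) :
    (cs.map pvCatB).getD i 0 = pvCatIdx (pvCK cs i) := by
  unfold pvCK
  rcases lt_or_ge i cs.length with h | h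
  · rw [List.getD_eq_getElem?_getD, List.getElem?_map, List.getElem?_eq_getElem h]
    simp [catB_eq, List.getD_eq_getElem?_getD, List.getElem?_eq_getElem h]
  · rw [List.getD_eq_getElem?_getD, List.getElem?_map, List.getElem?_eq_none (by simpa using h)]
    rw [List.getD_eq_getElem?_getD, List.getElem?_eq_none (by simpa using h)]
    simp [pvCatOf, pvCatIdx]
    decide

theorem alt_eq_pairs (text : String) :
    getSplitText_alt text =
      (if text.toList = [] then [] else pvPairsTok text.toList (pvCutlist text.toList)).map
        (fun cs => String.ofList cs) := by
  unfold getSplitText_alt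
  cases hcs : text.toList with
  | nil => simp
  | cons c0 rest =>
    set cs : List Char := c0 :: rest with hcs'
    rw [if_neg (by simp [hcs'] : ¬ (cs.isEmpty = true)), if_neg (by simp [hcs'] : ¬ (cs = []))]
    dsimp only
    -- reduce the Int cut list to the Nat one
    have hrange : PySem.List.pyRange 1 (cs.length : Int) 1 =
        (List.range (cs.length - 1)).map (fun k => ((k + 1 : Nat) : Int)) := by
      rw [PySem.List.pyRange_one]
      have hlen : ((cs.length : Int) - 1).toNat = cs.length - 1 := by omega
      rw [hlen]
      apply List.map_congr_left
      intro k _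
      push_cast
      ring
    have hpred : ∀ k : Nat,
        ((PySem.List.pyGetD (cs.map pvCatB) ((k + 1 : Nat) : Int) 0 !=
            PySem.List.pyGetD (cs.map pvCatB) (((k + 1 : Nat) : Int) - 1) 0) ||
         (PySem.List.pyGetD (cs.map pvCatB) ((k + 1 : Nat) : Int) 0 == 1)) = pvBdry cs k := by
      intro k
      have h1 : (((k + 1 : Nat) : Int) - 1) = ((k : Nat) : Int) := by push_cast; ring
      rw [h1, PySem.List.pyGetD_natCast, PySem.List.pyGetD_natCast]
      rw [getD_map_catB, getD_map_catB]
      unfold pvBdry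
      have hidx1 : (pvCatIdx (pvCK cs (k + 1)) == (1 : Int)) = decide (pvCK cs (k + 1) = PvCat.d) := by
        rw [show (1 : Int) = pvCatIdx PvCat.d from rfl]
        by_cases h : pvCK cs (k + 1) = PvCat.d
        · simp [h]
        · have hne2 : pvCatIdx (pvCK cs (k + 1)) ≠ pvCatIdx PvCat.d :=
            fun hc => h ((catIdx_inj _ _).mp hc)
          simp [h, hne2]
      have hidxne : (pvCatIdx (pvCK cs (k + 1)) != pvCatIdx (pvCK cs k)) =
          decide (pvCK cs (k + 1) ≠ pvCK cs k) := by
        by_cases h : pvCK cs (k + 1) = pvCK cs k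
        · simp [h]
        · have hne2 : pvCatIdx (pvCK cs (k + 1)) ≠ pvCatIdx (pvCK cs k) :=
            fun hc => h ((catIdx_inj _ _).mp hc)
          simp [h, bne, hne2]
      rw [hidx1, hidxne]
    have hfilter : (PySem.List.pyRange 1 (cs.length : Int) 1).filter
        (fun i => (PySem.List.pyGetD (cs.map pvCatB) i 0 != PySem.List.pyGetD (cs.map pvCatB) (i - 1) 0) ||
                  (PySem.List.pyGetD (cs.map pvCatB) i 0 == 1)) =
        ((List.range (cs.length - 1)).filter (pvBdry cs)).map (fun k => ((k + 1 : Nat) : Int)) := by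
      rw [hrange, List.filter_map]
      congr 1
      apply List.filter_congr
      intro k _
      exact hpred k
    rw [hfilter]
    -- the Int cut list is the Nat cut list mapped through the cast
    have hcast : (0 : Int) :: ((pvCutsK cs).map (fun k => ((k + 1 : Nat) : Int))) ++ [(cs.length : Int)] =
        (pvCutlist cs).map (fun n : Nat => (n : Int)) := by
      unfold pvCutlist pvCutsK
      simp [List.map_map, Function.comp]
    rw [show ((List.range (cs.length - 1)).filter (pvBdry cs)) = pvCutsK cs from rfl, hcast]
    -- slices with Nat-cast bounds are drop/take
    unfold pvPairsTok
    rw [← List.map_tail, List.zip_map, List.map_map, List.map_map]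
    apply List.map_congr_left
    intro ab _
    obtain ⟨a, b⟩ := ab
    simp only [Function.comp_apply, Prod.map, Function.comp]
    rw [PySem.List.slice_natCast]

-- ---------- cuts-and-slices equals pvChunks ----------

-- length of the first run
def pvRunLen : List Char → Nat
  | [] => 0
  | c :: rest =>
    if pvCatOf c = .d then 1
    else 1 + (rest.takeWhile (fun x => pvCatOf x = pvCatOf c)).length

theorem takeWhile_getD_true {α : Type} (l : List α) (p : α → Bool) (d : α) (i : Nat)
    (h : i < (l.takeWhile p).length) : p (l.getD i d) = true := by
  induction l generalizing i with
  | nil => simp [List.takeWhile] at h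
  | cons c rest ih =>
    by_cases hp : p c
    · rw [List.takeWhile_cons_of_pos hp] at h
      cases i with
      | zero => simpa using hp
      | succ j => exact ih j (by simpa using h)
    · rw [List.takeWhile_cons_of_neg hp] at h
      simp at h

theorem takeWhile_getD_false {α : Type} (l : List α) (p : α → Bool) (d : α)
    (h : (l.takeWhile p).length < l.length) : p (l.getD (l.takeWhile p).length d) = false := by
  induction l with
  | nil => simp at h
  | cons c rest ih =>
    by_cases hp : p c
    · rw [List.takeWhile_cons_of_pos hp] at h ⊢
      simpa using ih (by simpa using h)
    · rw [List.takeWhile_cons_of_neg hp]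
      simpa using hp

theorem take_takeWhile_len {α : Type} (l : List α) (p : α → Bool) :
    l.take (l.takeWhile p).length = l.takeWhile p := by
  induction l with
  | nil => rfl
  | cons c rest ih =>
    by_cases hp : p c
    · rw [List.takeWhile_cons_of_pos hp]
      simpa using ih
    · rw [List.takeWhile_cons_of_neg hp]
      rfl

theorem drop_takeWhile_len {α : Type} (l : List α) (p : α → Bool) :
    l.drop (l.takeWhile p).length = l.dropWhile p := by
  induction l with
  | nil => rfl
  | cons c rest ih =>
    by_cases hp : p c
    · rw [List.takeWhile_cons_of_pos hp, List.dropWhile_cons_of_pos hp]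
      simpa using ih
    · rw [List.takeWhile_cons_of_neg hp, List.dropWhile_cons_of_neg hp]
      rfl

theorem chunksC_d (cur : List Char) (cs : List Char) :
    pvChunksC cur .d cs = cur :: pvChunks cs := by
  cases cs with
  | nil => rfl
  | cons c rest =>
    rw [pvChunksC, if_neg (by simp)]
    rfl

theorem chunksC_run (cs : List Char) (cur : List Char) (k : PvCat) (hk : k ≠ .d) :
    pvChunksC cur k cs = (cur ++ cs.takeWhile (fun x => pvCatOf x = k)) ::
      pvChunks (cs.dropWhile (fun x => pvCatOf x = k)) := by
  induction cs generalizing cur with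
  | nil => simp [pvChunksC, pvChunks]
  | cons c rest ih =>
    by_cases hc : pvCatOf c = k
    · rw [pvChunksC, if_pos ⟨hc, hk⟩, ih (cur ++ [c]),
        List.takeWhile_cons_of_pos (by simpa using hc), List.dropWhile_cons_of_pos (by simpa using hc)]
      simp
    · rw [pvChunksC, if_neg (fun h => hc h.1),
        List.takeWhile_cons_of_neg (by simpa using hc), List.dropWhile_cons_of_neg (by simpa using hc)]
      simp [pvChunks]

theorem runLen_pos (cs : List Char) (h : cs ≠ []) : 1 ≤ pvRunLen cs := by
  cases cs with
  | nil => exact absurd rfl h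
  | cons c rest => simp only [pvRunLen]; split_ifs <;> omega

theorem takeWhile_len_le {α : Type} (l : List α) (p : α → Bool) :
    (l.takeWhile p).length ≤ l.length := by
  induction l with
  | nil => simp
  | cons c rest ih =>
    by_cases hp : p c
    · rw [List.takeWhile_cons_of_pos hp]; simpa using ih
    · rw [List.takeWhile_cons_of_neg hp]; simp

theorem runLen_le (cs : List Char) : pvRunLen cs ≤ cs.length := by
  cases cs with
  | nil => simp [pvRunLen]
  | cons c rest =>
    simp only [pvRunLen]
    have := takeWhile_len_le rest (fun x => decide (pvCatOf x = pvCatOf c))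
    split_ifs <;> simp <;> omega

theorem chunks_step (cs : List Char) (h : cs ≠ []) :
    pvChunks cs = cs.take (pvRunLen cs) :: pvChunks (cs.drop (pvRunLen cs)) := by
  cases cs with
  | nil => exact absurd rfl h
  | cons c rest =>
    by_cases hd : pvCatOf c = .d
    · rw [show pvChunks (c :: rest) = pvChunksC [c] (pvCatOf c) rest from rfl, hd, chunksC_d]
      simp [pvRunLen, hd]
    · rw [show pvChunks (c :: rest) = pvChunksC [c] (pvCatOf c) rest from rfl,
        chunksC_run rest [c] (pvCatOf c) hd]
      have hr : pvRunLen (c :: rest) = 1 + (rest.takeWhile (fun x => pvCatOf x = pvCatOf c)).length := by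
        simp [pvRunLen, hd]
      rw [hr]
      congr 1
      · rw [show (1 + (rest.takeWhile (fun x => pvCatOf x = pvCatOf c)).length) =
            ((rest.takeWhile (fun x => pvCatOf x = pvCatOf c)).length) + 1 from by omega]
        rw [List.take_succ_cons, take_takeWhile_len]
        rfl
      · rw [show (1 + (rest.takeWhile (fun x => pvCatOf x = pvCatOf c)).length) =
            ((rest.takeWhile (fun x => pvCatOf x = pvCatOf c)).length) + 1 from by omega]
        rw [List.drop_succ_cons, drop_takeWhile_len]

-- characters strictly inside the first run share its category
theorem run_cat (cs : List Char) (h : cs ≠ []) (i : Nat) (hi : i < pvRunLen cs) :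
    pvCK cs i = pvCK cs 0 := by
  cases cs with
  | nil => exact absurd rfl h
  | cons c rest =>
    by_cases hd : pvCatOf c = .d
    · have : pvRunLen (c :: rest) = 1 := by simp [pvRunLen, hd]
      rw [this] at hi
      interval_cases i
      rfl
    · have hr : pvRunLen (c :: rest) = 1 + (rest.takeWhile (fun x => pvCatOf x = pvCatOf c)).length := by
        simp [pvRunLen, hd]
      rw [hr] at hi
      cases i with
      | zero => rfl
      | succ j =>
        have hj : j < (rest.takeWhile (fun x => decide (pvCatOf x = pvCatOf c))).length := by
          simpa using (by omega : j < (rest.takeWhile (fun x => pvCatOf x = pvCatOf c)).length)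
        have := takeWhile_getD_true rest (fun x => decide (pvCatOf x = pvCatOf c)) ' ' j hj
        simp only [decide_eq_true_eq] at this
        unfold pvCK
        simpa using this

-- the character just after the first run (if any) has a different category, unless delimiter head
theorem bdry_at_run_end (cs : List Char) (h : cs ≠ []) (hm : pvRunLen cs < cs.length) :
    pvBdry cs (pvRunLen cs - 1) = true := by
  cases cs with
  | nil => exact absurd rfl h
  | cons c rest =>
    set m := pvRunLen (c :: rest) with hmdef
    have hm1 : 1 ≤ m := runLen_pos _ (by simp)
    have hsub : m - 1 + 1 = m := by omega
    unfold pvBdry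
    rw [hsub]
    by_cases hdd : pvCK (c :: rest) m = PvCat.d
    · simp [hdd]
    · suffices hne : pvCK (c :: rest) m ≠ pvCK (c :: rest) (m - 1) by simp [hne]
      have hrun : pvCK (c :: rest) (m - 1) = pvCK (c :: rest) 0 := run_cat _ (by simp) _ (by omega)
      rw [hrun]
      by_cases hd : pvCatOf c = .d
      · have : pvCK (c :: rest) 0 = PvCat.d := by unfold pvCK; simpa using hd
        rw [this]; exact hdd
      · have hr : m = 1 + (rest.takeWhile (fun x => pvCatOf x = pvCatOf c)).length := by
          simp [hmdef, pvRunLen, hd]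
        have hlt : (rest.takeWhile (fun x => decide (pvCatOf x = pvCatOf c))).length < rest.length := by
          have := hm; simp only [List.length_cons] at this; omega
        have := takeWhile_getD_false rest (fun x => decide (pvCatOf x = pvCatOf c)) ' ' hlt
        simp only [decide_eq_false_iff_not] at this
        intro hcontra
        apply this
        have h0 : pvCK (c :: rest) 0 = pvCatOf c := rfl
        rw [h0] at hcontra
        unfold pvCK at hcontra
        rw [hr] at hcontra
        rw [show 1 + (rest.takeWhile (fun x => pvCatOf x = pvCatOf c)).length =
            (rest.takeWhile (fun x => pvCatOf x = pvCatOf c)).length + 1 from by omega] at hcontra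
        rw [List.getD_cons_succ] at hcontra
        exact hcontra

-- boundaries inside the first run are absent
theorem no_bdry_in_run (cs : List Char) (h : cs ≠ []) (k : Nat) (hk : k < pvRunLen cs - 1) :
    pvBdry cs k = false := by
  have h1 : pvCK cs (k + 1) = pvCK cs 0 := run_cat cs h (k + 1) (by omega)
  have h2 : pvCK cs k = pvCK cs 0 := run_cat cs h k (by omega)
  have hnd : pvCK cs 0 ≠ PvCat.d := by
    cases cs with
    | nil => exact absurd rfl h
    | cons c rest =>
      intro hdd
      have : pvCatOf c = .d := by unfold pvCK at hdd; simpa using hdd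
      have : pvRunLen (c :: rest) = 1 := by simp [pvRunLen, this]
      omega
  unfold pvBdry
  rw [h1, h2]
  simp [hnd]

-- boundaries beyond the first run are those of the dropped suffix, shifted
theorem bdry_shift (cs : List Char) (m j : Nat) (hm : m ≤ cs.length) :
    pvBdry cs (m + j) = pvBdry (cs.drop m) j := by
  have hck : ∀ i : Nat, pvCK cs (m + i) = pvCK (cs.drop m) i := by
    intro i
    unfold pvCK
    rw [List.getD_eq_getElem?_getD, List.getD_eq_getElem?_getD, List.getElem?_drop]
  unfold pvBdry
  rw [show m + j + 1 = m + (j + 1) from by omega, hck (j + 1), hck j]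

theorem cutsK_step (cs : List Char) (h : cs ≠ []) :
    pvCutsK cs = (if pvRunLen cs < cs.length
      then (pvRunLen cs - 1) :: (pvCutsK (cs.drop (pvRunLen cs))).map (fun j => pvRunLen cs + j)
      else []) := by
  set m := pvRunLen cs with hmdef
  have hm1 : 1 ≤ m := runLen_pos cs h
  have hmle : m ≤ cs.length := runLen_le cs
  unfold pvCutsK
  by_cases hlt : m < cs.length
  · rw [if_pos hlt]
    have hsplit : cs.length - 1 = (m - 1) + (cs.length - m) := by omega
    rw [hsplit, List.range_add, List.filter_append]
    have hfirst : ((List.range (m - 1)).filter (pvBdry cs)) = [] := by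
      apply List.filter_eq_nil_iff.mpr
      intro k hk
      rw [List.mem_range] at hk
      simp [no_bdry_in_run cs h k (by omega)]
    rw [hfirst, List.nil_append, List.filter_map]
    have hlen2 : cs.length - m = (cs.length - m - 1) + 1 := by omega
    rw [hlen2, List.range_succ_eq_map, List.filter_cons]
    have hb0 : (pvBdry cs ∘ fun x => m - 1 + x) 0 = true := by
      simp only [Function.comp_apply, Nat.add_zero]
      exact bdry_at_run_end cs h hlt
    rw [if_pos hb0, List.filter_map, List.map_cons, List.map_map]
    congr 1
    have hinner : (List.range (cs.length - m - 1)).filter ((pvBdry cs ∘ fun x => m - 1 + x) ∘ Nat.succ) =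
        (List.range (cs.length - m - 1)).filter (pvBdry (cs.drop m)) := by
      apply List.filter_congr
      intro j _
      simp only [Function.comp_apply]
      rw [show m - 1 + Nat.succ j = m + j from by omega, bdry_shift cs m j hmle]
    rw [hinner]
    have hdlen : cs.length - m - 1 = (cs.drop m).length - 1 := by
      rw [List.length_drop]
    rw [hdlen]
    show ((List.range ((cs.drop m).length - 1)).filter (pvBdry (cs.drop m))).map
        ((fun x => m - 1 + x) ∘ Nat.succ) = (pvCutsK (cs.drop m)).map (fun j => m + j)
    unfold pvCutsK
    apply List.map_congr_left
    intro j _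
    simp only [Function.comp_apply]
    omega
  · rw [if_neg hlt]
    apply List.filter_eq_nil_iff.mpr
    intro k hk
    rw [List.mem_range] at hk
    simp [no_bdry_in_run cs h k (by omega)]

-- shifting all cuts by m corresponds to slicing the dropped suffix
theorem pairs_shift (cs : List Char) (m : Nat) (L : List Nat) :
    pvPairsTok cs (L.map (fun j => m + j)) = pvPairsTok (cs.drop m) L := by
  unfold pvPairsTok
  rw [← List.map_tail, List.zip_map, List.map_map]
  apply List.map_congr_left
  intro ab _
  obtain ⟨a, b⟩ := ab
  simp only [Prod.map, Function.comp]
  rw [List.drop_drop, show m + b - (m + a) = b - a from by omega]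

theorem pairs_eq_chunks (n : Nat) : ∀ (cs : List Char), cs.length ≤ n → cs ≠ [] →
    pvPairsTok cs (pvCutlist cs) = pvChunks cs := by
  induction n with
  | zero =>
    intro cs hlen hne
    cases cs with
    | nil => exact absurd rfl hne
    | cons c r => simp at hlen
  | succ n ih =>
    intro cs hlen hne
    set m := pvRunLen cs with hmdef
    have hm1 : 1 ≤ m := runLen_pos cs hne
    have hmle : m ≤ cs.length := runLen_le cs
    rw [chunks_step cs hne]
    unfold pvCutlist
    rw [cutsK_step cs hne]
    by_cases hlt : m < cs.length
    · rw [if_pos hlt]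
      have hT : ((0 : Nat) :: ((m - 1) :: (pvCutsK (cs.drop m)).map (fun j => m + j)).map (· + 1) ++ [cs.length]) =
          0 :: ((pvCutlist (cs.drop m)).map (fun j => m + j)) := by
        unfold pvCutlist
        have e1 : m - 1 + 1 = m := by omega
        have e2 : m + (cs.drop m).length = cs.length := by rw [List.length_drop]; omega
        have e3 : ((pvCutsK (cs.drop m)).map (fun j => m + j)).map (· + 1) =
            ((pvCutsK (cs.drop m)).map (· + 1)).map (fun j => m + j) := by
          rw [List.map_map, List.map_map]
          apply List.map_congr_left
          intro j _
          simp only [Function.comp_apply]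
          omega
        simp only [List.map_cons, List.map_append, List.map_nil, List.cons_append,
          List.nil_append, e1, e3, e2, Nat.add_zero]
      rw [hT]
      have hfirst : pvPairsTok cs (0 :: (pvCutlist (cs.drop m)).map (fun j => m + j)) =
          cs.take m :: pvPairsTok cs ((pvCutlist (cs.drop m)).map (fun j => m + j)) := by
        unfold pvPairsTok pvCutlist
        simp only [List.map_cons, List.map_append, List.cons_append, List.tail_cons,
          List.zip_cons_cons, List.map_cons, List.drop_zero, Nat.add_zero, Nat.sub_zero]
      rw [hfirst, pairs_shift]
      congr 1
      have hdne : cs.drop m ≠ [] := by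
        intro hd
        have := congrArg List.length hd
        rw [List.length_drop] at this
        simp at this
        omega
      exact ih (cs.drop m) (by rw [List.length_drop]; omega) hdne
    · rw [if_neg hlt]
      have hm : m = cs.length := by omega
      have hdrop : cs.drop m = [] := by rw [hm, List.drop_length]
      rw [hdrop, show pvChunks ([] : List Char) = [] from rfl]
      unfold pvPairsTok
      simp [← hmdef, hm, List.take_length]

-- ===== VERDICT (by name: the statement is the Claim_ definition above) =====
theorem getSplitText_spec : Claim_equal_getSplitText := by
  intro text _
  unfold Spec_getSplitText
  rw [A_eq_old, old_eq_chunks, alt_eq_pairs]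
  by_cases h : text.toList = []
  · simp [h, pvChunks]
  · rw [if_neg h, pairs_eq_chunks text.toList.length text.toList le_rfl h]
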